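-- pv_equiv track=rewrite | github.com/UOS841/ProblemSolving | ATRON3273/P60057(문자열 압축).py | convert
-- ===== SOURCE A (Python) =====
-- def add_str(convert_str, adding_str, count):
--     if count == 1:
--         convert_str += adding_str
--     else:
--         convert_str += (str(count) + adding_str)
--
--     return convert_str
--
-- def convert(s, period):
--     str_size = len(s)
--     idx = 0
--     before_substr = ""
--     convert_str = ""
--     sub_count = 1
--
--     while idx < str_size:
--         tmp_substr = s[idx:idx+period]
--
--         # 제일 처음 탐색인 경우
--         if idx == 0:
--             # 마지막 탐색이면 그대로 출력
--             if idx + period >= str_size: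
--                 convert_str = add_str(convert_str, tmp_substr, sub_count)
--             else:
--                 before_substr = tmp_substr
--
--             idx += period
--             continue
--
--         # 기존 버퍼 내용과 같은 경우
--         if before_substr == tmp_substr:
--             sub_count += 1
--         # 기존 버퍼 내용과 다른 경우
--         else:
--             convert_str = add_str(convert_str, before_substr, sub_count)
--             # 현재 탐색 데이터로 교체
--             before_substr = tmp_substr
--             sub_count = 1
--
--         # 마지막 탐색인 경우 마저 출력
--         if idx + period >= str_size:
--             convert_str = add_str(convert_str, before_substr, sub_count)
--
--         idx += period
--
--     return convert_str
-- ===== SOURCE B (Python) =====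
-- def convert(s, period):
--     chunks = [s[i:i + period] for i in range(0, len(s), period)]
--
--     def render(chs):
--         if not chs:
--             return ""
--         head = chs[0]
--         rest = chs[1:]
--         run = 0
--         while run < len(rest) and rest[run] == head:
--             run += 1
--         k = run + 1
--         piece = head if k == 1 else str(k) + head
--         return piece + render(rest[run:])
--
--     return render(chunks)
-- ===== Notes on version B (the rewrite author's own statement) =====
-- stated objective: simpler
-- what changed: A's single fused while-loop with sentinel state (before_substr/sub_count and a special first-iteration branch) is replaced by a two-stage decomposition: materialize the chunk list with one slice comprehension, then render runs of equal chunks by a small recursive function.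
-- outside the precondition, e.g. on convert('abc', 0): A does not finish within the time limit, B raises ValueError; on convert('', 0): A returns '', B raises ValueError
import Mathlib
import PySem

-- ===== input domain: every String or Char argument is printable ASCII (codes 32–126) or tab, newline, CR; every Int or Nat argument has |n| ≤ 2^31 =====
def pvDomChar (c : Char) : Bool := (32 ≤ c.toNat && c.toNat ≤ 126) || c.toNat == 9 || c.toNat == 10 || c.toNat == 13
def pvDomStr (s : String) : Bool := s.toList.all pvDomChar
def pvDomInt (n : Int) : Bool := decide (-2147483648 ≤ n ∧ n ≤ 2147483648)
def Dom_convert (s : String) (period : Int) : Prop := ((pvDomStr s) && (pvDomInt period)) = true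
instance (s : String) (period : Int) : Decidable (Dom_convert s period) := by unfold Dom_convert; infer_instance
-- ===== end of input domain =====

-- B replaces A's sentinel-driven fused while-loop by a two-stage decomposition (materialize the
-- chunk list, then render its runs recursively); objective: simpler/idiomatic, same asymptotic cost.


-- ===== PORT A =====
-- port of add_str (works on List Char; the final result is wrapped back into String)
def addStr (convertStr adding : List Char) (count : Int) : List Char :=
  if count == 1 then convertStr ++ adding
  else convertStr ++ (PySem.Int.toChars count ++ adding)

-- port of A's while-loop; fuel bounds the iteration count (inside Pre_ the loop body runs at
-- most len(s) times, so the fuel supplied in `convert` is never exhausted there)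
def convertLoop (cs : List Char) (strSize period : Int) :
    Nat → Int → List Char → List Char → Int → List Char
  | 0, _, _, convertStr, _ => convertStr
  | Nat.succ fuel, idx, beforeSubstr, convertStr, subCount =>
    if idx < strSize then
      let tmpSubstr := PySem.List.slice cs (some idx) (some (idx + period))
      if idx == 0 then
        if strSize ≤ idx + period then
          convertLoop cs strSize period fuel (idx + period) beforeSubstr
            (addStr convertStr tmpSubstr subCount) subCount
        else
          convertLoop cs strSize period fuel (idx + period) tmpSubstr convertStr subCount
      else
        if beforeSubstr == tmpSubstr then
          let subCount' := subCount + 1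
          if strSize ≤ idx + period then
            convertLoop cs strSize period fuel (idx + period) beforeSubstr
              (addStr convertStr beforeSubstr subCount') subCount'
          else
            convertLoop cs strSize period fuel (idx + period) beforeSubstr convertStr subCount'
        else
          let convertStr' := addStr convertStr beforeSubstr subCount
          if strSize ≤ idx + period then
            convertLoop cs strSize period fuel (idx + period) tmpSubstr
              (addStr convertStr' tmpSubstr 1) 1
          else
            convertLoop cs strSize period fuel (idx + period) tmpSubstr convertStr' 1
    else convertStr

def convert (s : String) (period : Int) : String :=
  String.ofList (convertLoop s.toList (PySem.Str.len s) period (s.toList.length + 1) 0 [] [] 1)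

-- ===== PORT B =====
-- chunks = [s[i:i+period] for i in range(0, len(s), period)]
def pvChunks (s : String) (period : Int) : List (List Char) :=
  (PySem.List.pyRange 0 (PySem.Str.len s) period).map
    (fun i => PySem.List.slice s.toList (some i) (some (i + period)))

-- the while-loop counting the leading run of `head` in `rest`
def pvRun (head : List Char) : List (List Char) → Nat
  | [] => 0
  | x :: xs => if x == head then pvRun head xs + 1 else 0

-- render(chs): emit the first run, recurse on the remainder
def pvRender : List (List Char) → List Char
  | [] => []
  | head :: rest =>
    let run := pvRun head rest
    let k : Int := (run : Int) + 1
    let piece := if k == 1 then head else PySem.Int.toChars k ++ head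
    piece ++ pvRender (rest.drop run)
termination_by chs => chs.length
decreasing_by
  simp only [List.length_cons, List.length_drop]
  omega

def convert_alt (s : String) (period : Int) : String :=
  String.ofList (pvRender (pvChunks s period))

-- ===== PRECONDITION & SPEC =====
-- Pre_ excludes period ≤ 0 with nonempty s, where A's loop never terminates, and period = 0 with
-- s = "", where A happens to return "" but B's range(0, 0, 0) raises ValueError.
def Pre_convert (s : String) (period : Int) : Prop :=
  1 ≤ period ∨ (s = "" ∧ period ≠ 0)
instance (s : String) (period : Int) : Decidable (Pre_convert s period) := by
  unfold Pre_convert; infer_instance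

def pvWitness_convert : String × Int := ("aabbaa", 2)

def Spec_convert (s : String) (period : Int) (out : String) : Prop := out = convert_alt s period
instance (s : String) (period : Int) (out : String) : Decidable (Spec_convert s period out) := by
  unfold Spec_convert; infer_instance

-- ===== CLAIM (what is proved, stated in full; the proofs are below) =====
def Claim_equal_convert : Prop :=
  ∀ (s : String) (period : Int), Dom_convert s period → Pre_convert s period →
    Spec_convert s period (convert s period)

-- ===== LEMMAS AND PROOFS =====

-- reference chunking used by both directions of the proof: chunks of size q+1
def chunkRec (q : Nat) : List Char → List (List Char)
  | [] => []
  | c :: rest => (c :: rest.take q) :: chunkRec q (rest.drop q)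
termination_by cs => cs.length
decreasing_by
  simp only [List.length_cons, List.length_drop]
  omega

-- the string a run (chunk b, count k) contributes to the output
def strOf (b : List Char) (k : Int) : List Char :=
  if k == 1 then b else PySem.Int.toChars k ++ b

-- the tail of A's loop, as a function of the remaining chunk list
def merge (b : List Char) (k : Int) : List (List Char) → List Char
  | [] => []
  | t :: rest =>
    if t == b then
      (if rest.isEmpty then strOf b (k + 1) else []) ++ merge b (k + 1) rest
    else
      strOf b k ++ (if rest.isEmpty then strOf t 1 else []) ++ merge t 1 rest

theorem addStr_eq (conv adding : List Char) (k : Int) :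
    addStr conv adding k = conv ++ strOf adding k := by
  rw [addStr, strOf]; split <;> simp

theorem pyRange_pos_cons (a b s : Int) (hs : 0 < s) (hab : a < b) :
    PySem.List.pyRange a b s = a :: PySem.List.pyRange (a + s) b s := by
  rw [PySem.List.pyRange_of_pos a b hs, PySem.List.pyRange_of_pos (a + s) b hs]
  rw [if_pos hab]
  have key : (b - a + s - 1) / s = (b - a - 1) / s + 1 := by
    have : b - a + s - 1 = (b - a - 1) + 1 * s := by ring
    rw [this, Int.add_mul_ediv_right _ _ (by omega : s ≠ 0)]
  have hnn : 0 ≤ (b - a - 1) / s := Int.ediv_nonneg (by omega) (by omega)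
  rw [key, Int.toNat_add hnn (by norm_num)]
  norm_num
  rw [List.range_succ_eq_map]
  simp only [List.map_cons, List.map_map]
  congr 1
  · norm_num
  by_cases h2 : a + s < b
  · rw [if_pos h2]
    have : b - (a + s) + s - 1 = b - a - 1 := by ring
    rw [this]
    apply List.map_congr_left
    intro k _
    simp only [Function.comp_apply]
    push_cast
    ring
  · rw [if_neg h2]
    have : (b - a - 1) / s = 0 := Int.ediv_eq_zero_of_lt (by omega) (by omega)
    simp [this]

theorem pyRange_pos_nil (a b s : Int) (hs : 0 < s) (hab : b ≤ a) :
    PySem.List.pyRange a b s = [] := by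
  rw [PySem.List.pyRange_of_pos a b hs]
  simp [if_neg (by omega : ¬ a < b)]

-- L1: the comprehension over range(a, len, p) computes chunkRec on the dropped list
theorem chunks_eq (w : List Char) (p : Nat) (hp : 1 ≤ p) :
    ∀ (fuel a : Nat), w.length ≤ a + fuel →
      (PySem.List.pyRange (a : Int) (w.length : Int) (p : Int)).map
        (fun i => PySem.List.slice w (some i) (some (i + (p : Int)))) =
      chunkRec (p - 1) (w.drop a) := by
  intro fuel
  induction fuel with
  | zero =>
    intro a h
    rw [pyRange_pos_nil _ _ _ (by exact_mod_cast hp) (by exact_mod_cast h)]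
    rw [List.drop_eq_nil_of_le (by omega)]
    simp [chunkRec]
  | succ fuel ih =>
    intro a h
    by_cases ha : a < w.length
    · rw [pyRange_pos_cons _ _ _ (by exact_mod_cast hp) (by exact_mod_cast ha)]
      rw [List.map_cons]
      have hne : w.drop a ≠ [] := by
        simp only [ne_eq, List.drop_eq_nil_iff]
        omega
      obtain ⟨c, rest, hdrop⟩ := List.exists_cons_of_ne_nil hne
      have hslice : PySem.List.slice w (some (a : Int)) (some ((a : Int) + (p : Int))) =
          c :: rest.take (p - 1) := by
        rw [PySem.List.slice_natCast_add w a p, hdrop]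
        obtain ⟨q, rfl⟩ : ∃ q, p = q + 1 := ⟨p - 1, by omega⟩
        simp [List.take_succ_cons]
      have hcast : (a : Int) + (p : Int) = ((a + p : Nat) : Int) := by push_cast; ring
      rw [hslice, hcast, ih (a + p) (by omega), hdrop]
      rw [chunkRec]
      congr 1
      rw [← List.drop_drop]
      rw [hdrop]
      obtain ⟨q, rfl⟩ : ∃ q, p = q + 1 := ⟨p - 1, by omega⟩
      simp
    · rw [pyRange_pos_nil _ _ _ (by exact_mod_cast hp)
        (by exact_mod_cast (by omega : w.length ≤ a))]
      rw [List.drop_eq_nil_of_le (by omega)]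
      simp [chunkRec]

-- L2: A's loop from any mid-state (idx > 0) computes merge over the remaining chunks
theorem loop_merge (cs : List Char) (p : Nat) (hp : 1 ≤ p) :
    ∀ (fuel n : Nat) (before conv : List Char) (cnt : Int), 0 < n →
      cs.length + 1 ≤ n + fuel →
      convertLoop cs (cs.length : Int) (p : Int) fuel (n : Int) before conv cnt =
        conv ++ merge before cnt (chunkRec (p - 1) (cs.drop n)) := by
  intro fuel
  induction fuel with
  | zero =>
    intro n before conv cnt hn hf
    rw [convertLoop, List.drop_eq_nil_of_le (by omega)]
    simp [chunkRec, merge]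
  | succ fuel ih =>
    intro n before conv cnt hn hf
    rw [convertLoop]
    by_cases hlt : n < cs.length
    · rw [if_pos (by exact_mod_cast hlt)]
      have h0 : ((n : Int) == 0) = false := by
        simp only [beq_eq_false_iff_ne, ne_eq]
        omega
      simp only [h0, Bool.false_eq_true, if_false]
      have hne : cs.drop n ≠ [] := by
        simp only [ne_eq, List.drop_eq_nil_iff]; omega
      obtain ⟨c, rest, hdrop⟩ := List.exists_cons_of_ne_nil hne
      have hslice : PySem.List.slice cs (some (n : Int)) (some ((n : Int) + (p : Int))) =
          c :: rest.take (p - 1) := by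
        rw [PySem.List.slice_natCast_add cs n p, hdrop]
        obtain ⟨q, rfl⟩ : ∃ q, p = q + 1 := ⟨p - 1, by omega⟩
        simp [List.take_succ_cons]
      have hdd : rest.drop (p - 1) = cs.drop (n + p) := by
        rw [← List.drop_drop, hdrop]
        obtain ⟨q, rfl⟩ : ∃ q, p = q + 1 := ⟨p - 1, by omega⟩
        simp
      have hchunk : chunkRec (p - 1) (cs.drop n) =
          (c :: rest.take (p - 1)) :: chunkRec (p - 1) (cs.drop (n + p)) := by
        rw [hdrop, chunkRec, hdd]
      have hcast : (n : Int) + (p : Int) = ((n + p : Nat) : Int) := by push_cast; ring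
      have hlast_iff : ((cs.length : Int) ≤ (n : Int) + (p : Int)) ↔ cs.drop (n + p) = [] := by
        rw [List.drop_eq_nil_iff]
        constructor <;> intro h <;> [exact_mod_cast h; exact_mod_cast h]
      rw [hslice, hchunk, merge]
      by_cases heq : before = c :: rest.take (p - 1)
      · have hb1 : (before == c :: rest.take (p - 1)) = true := by simp [heq]
        have hb2 : ((c :: rest.take (p - 1)) == before) = true := by simp [heq]
        simp only [hb1, hb2, if_true]
        by_cases hlast : (cs.length : Int) ≤ (n : Int) + (p : Int)
        · rw [if_pos hlast]
          have hnil : cs.drop (n + p) = [] := hlast_iff.mp hlast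
          rw [hcast, ih (n + p) before (addStr conv before (cnt + 1)) (cnt + 1)
            (by omega) (by omega)]
          rw [hnil]
          simp [chunkRec, merge, addStr_eq, heq]
        · rw [if_neg hlast]
          have hnnil : cs.drop (n + p) ≠ [] := fun h => hlast (hlast_iff.mpr h)
          have hempty : (chunkRec (p - 1) (cs.drop (n + p))).isEmpty = false := by
            rw [List.isEmpty_eq_false_iff_exists_mem]
            obtain ⟨x, xs, hx⟩ := List.exists_cons_of_ne_nil hnnil
            exact ⟨x :: (xs.take (p-1)), by rw [hx, chunkRec]; simp⟩
          rw [hcast, ih (n + p) before conv (cnt + 1) (by omega) (by omega)]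
          rw [hempty]
          simp
      · have hb1 : (before == c :: rest.take (p - 1)) = false := by simp [heq]
        have hb2 : ((c :: rest.take (p - 1)) == before) = false := by
          simp only [beq_eq_false_iff_ne, ne_eq]
          exact fun h => heq (Eq.symm h)
        simp only [hb1, hb2, Bool.false_eq_true, if_false]
        by_cases hlast : (cs.length : Int) ≤ (n : Int) + (p : Int)
        · rw [if_pos hlast]
          have hnil : cs.drop (n + p) = [] := hlast_iff.mp hlast
          rw [hcast, ih (n + p) (c :: rest.take (p - 1))
            (addStr (addStr conv before cnt) (c :: rest.take (p - 1)) 1) 1 (by omega) (by omega)]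
          rw [hnil]
          simp [chunkRec, merge, addStr_eq]
        · rw [if_neg hlast]
          have hnnil : cs.drop (n + p) ≠ [] := fun h => hlast (hlast_iff.mpr h)
          have hempty : (chunkRec (p - 1) (cs.drop (n + p))).isEmpty = false := by
            rw [List.isEmpty_eq_false_iff_exists_mem]
            obtain ⟨x, xs, hx⟩ := List.exists_cons_of_ne_nil hnnil
            exact ⟨x :: (xs.take (p-1)), by rw [hx, chunkRec]; simp⟩
          rw [hcast, ih (n + p) (c :: rest.take (p - 1)) (addStr conv before cnt) 1
            (by omega) (by omega)]
          rw [hempty]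
          simp [addStr_eq]
    · rw [if_neg (by exact_mod_cast hlt)]
      rw [List.drop_eq_nil_of_le (by omega)]
      simp [chunkRec, merge]

theorem pvRender_cons (t : List Char) (rest : List (List Char)) :
    pvRender (t :: rest) =
      strOf t ((pvRun t rest : Int) + 1) ++ pvRender (rest.drop (pvRun t rest)) := by
  rw [pvRender, strOf]

-- L3: merge with a pending run (b, k) equals render of the pending-extended list
theorem merge_render (chl : List (List Char)) :
    ∀ (b : List Char) (k : Int), chl ≠ [] →
      merge b k chl =
        strOf b (k + (pvRun b chl : Int)) ++ pvRender (chl.drop (pvRun b chl)) := by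
  induction chl with
  | nil => intro b k h; exact absurd rfl h
  | cons t rest ih =>
    intro b k _
    rw [merge]
    by_cases htb : t = b
    · subst htb
      have hrun : pvRun t (t :: rest) = pvRun t rest + 1 := by simp [pvRun]
      rw [hrun]
      cases rest with
      | nil =>
        simp [merge, pvRender, pvRun]
      | cons u us =>
        simp only [beq_self_eq_true, if_true, List.isEmpty_cons, Bool.false_eq_true,
          if_false, List.nil_append, List.drop_succ_cons]
        rw [ih t (k + 1) (by simp)]
        have h1 : k + 1 + ((pvRun t (u :: us) : Int)) = k + ((pvRun t (u :: us) : Int) + 1) := by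
          ring
        rw [h1]
        push_cast
        ring_nf
    · have hbeq : (t == b) = false := by simp [htb]
      have hrun : pvRun b (t :: rest) = 0 := by simp [pvRun, hbeq]
      rw [hrun]
      simp only [hbeq, Bool.false_eq_true, if_false, List.drop_zero, Nat.cast_zero, add_zero]
      rw [pvRender_cons]
      cases rest with
      | nil =>
        simp [merge, pvRun, pvRender, strOf]
      | cons u us =>
        simp only [List.isEmpty_cons, Bool.false_eq_true, if_false]
        rw [ih t 1 (by simp)]
        have h1 : 1 + ((pvRun t (u :: us) : Int)) = (pvRun t (u :: us) : Int) + 1 := by ring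
        rw [h1, List.append_assoc]
        simp

-- ===== VERDICT (by name: the statement is the Claim_ definition above) =====
theorem convert_spec : Claim_equal_convert := by
  intro s period hdom hpre
  unfold Spec_convert convert convert_alt pvChunks
  by_cases hp1 : 1 ≤ period
  · obtain ⟨p, rfl⟩ : ∃ p : Nat, period = (p : Int) := ⟨period.toNat, by omega⟩
    have hp : 1 ≤ p := by exact_mod_cast hp1
    have hchunks := chunks_eq s.toList p hp s.toList.length 0 (by omega)
    simp only [Nat.cast_zero, List.drop_zero] at hchunks
    rw [PySem.Str.len_eq, hchunks]
    cases hcs : s.toList with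
    | nil => simp [convertLoop, chunkRec, pvRender]
    | cons c rest =>
      have hlen1 : 1 ≤ (c :: rest).length := by simp
      rw [show (c :: rest).length + 1 = Nat.succ (c :: rest).length from rfl, convertLoop]
      rw [if_pos (by exact_mod_cast (by omega : 0 < (c :: rest).length))]
      simp only [beq_self_eq_true, if_true]
      have hslice0 : PySem.List.slice (c :: rest) (some (0 : Int))
          (some ((0 : Int) + (p : Int))) = (c :: rest).take p := by
        rw [PySem.List.slice_zero_start, PySem.List.slice_to _ (by omega)]
        congr 1
        omega
      rw [hslice0]
      have hzp : (0 : Int) + (p : Int) = ((p : Nat) : Int) := by ring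
      rw [hzp]
      have htake : (c :: rest).take p = c :: rest.take (p - 1) := by
        obtain ⟨q, rfl⟩ : ∃ q, p = q + 1 := ⟨p - 1, by omega⟩
        simp [List.take_succ_cons]
      have hdropp : (c :: rest).drop p = rest.drop (p - 1) := by
        obtain ⟨q, rfl⟩ : ∃ q, p = q + 1 := ⟨p - 1, by omega⟩
        simp
      have hchunk : chunkRec (p - 1) (c :: rest) =
          ((c :: rest).take p) :: chunkRec (p - 1) ((c :: rest).drop p) := by
        rw [chunkRec, ← htake, hdropp]
      by_cases hlast : ((c :: rest).length : Int) ≤ ((p : Nat) : Int)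
      · rw [if_pos hlast]
        have hdnil : (c :: rest).drop p = [] :=
          List.drop_eq_nil_of_le (by exact_mod_cast hlast)
        rw [loop_merge (c :: rest) p hp (c :: rest).length p [] (addStr [] ((c :: rest).take p) 1) 1
          (by omega) (by omega)]
        rw [hdnil, hchunk, hdnil]
        simp [chunkRec, merge, addStr_eq, pvRender_cons, pvRender, strOf, pvRun]
      · rw [if_neg hlast]
        have hdne : (c :: rest).drop p ≠ [] := by
          simp only [ne_eq, List.drop_eq_nil_iff]
          intro hle
          exact hlast (by exact_mod_cast hle)
        have hcne : chunkRec (p - 1) ((c :: rest).drop p) ≠ [] := by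
          obtain ⟨x, xs, hx⟩ := List.exists_cons_of_ne_nil hdne
          rw [hx, chunkRec]
          simp
        rw [loop_merge (c :: rest) p hp (c :: rest).length p ((c :: rest).take p) [] 1
          (by omega) (by omega)]
        rw [merge_render _ _ _ hcne, hchunk, pvRender_cons]
        have h1 : (1 : Int) + (pvRun ((c :: rest).take p) (chunkRec (p - 1) ((c :: rest).drop p)) : Int)
            = (pvRun ((c :: rest).take p) (chunkRec (p - 1) ((c :: rest).drop p)) : Int) + 1 := by
          ring
        rw [h1]
        simp
  · obtain ⟨hs, hp0⟩ := hpre.resolve_left hp1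
    subst hs
    simp only [String.toList_empty] at *
    rw [PySem.Str.len_eq]
    simp only [List.length_nil, Nat.cast_zero]
    rw [convertLoop]
    simp [PySem.List.pyRange, pvRender]
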